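-- pv_equiv track=rewrite | github.com/simosnasiou/Thesis-Project | src/root/text_functions.py | clean_xml_tags
-- ===== SOURCE A (Python) =====
-- def clean_xml_tags(sentence_in):
--     sentence_out=''
--     do_record=True
--     for each_letter in sentence_in:
--         if each_letter == '<':
--             do_record=False
--         elif each_letter=='>':
--             do_record=True
--         #de pairnoume tis allages seiras pou den einai entos twn sthlwn
--         if do_record and each_letter != '>' and each_letter!='\n' and each_letter!='\'':
--             sentence_out+=each_letter
--     return sentence_out
-- ===== SOURCE B (Python) =====
-- def clean_xml_tags(sentence_in):
--     # Phase 1: delete tag spans by jumping indices (find the closing '>'),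
--     # Phase 2: filter out the always-removed characters.
--     kept = []
--     i = 0
--     n = len(sentence_in)
--     while i < n:
--         if sentence_in[i] == '<':
--             j = sentence_in.find('>', i + 1)
--             i = n if j == -1 else j + 1
--         else:
--             kept.append(sentence_in[i])
--             i += 1
--     return ''.join(c for c in kept if c not in ">\n'")
-- ===== Notes on version B (the rewrite author's own statement) =====
-- stated objective: alternative
-- what changed: Replaces the single-pass do_record flag state machine with a two-phase approach: first delete '<...>' tag spans by jumping the index to the matching '>' (unclosed '<' consumes the rest), then filter out the always-removed characters '>', newline and apostrophe.
import Mathlib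
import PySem

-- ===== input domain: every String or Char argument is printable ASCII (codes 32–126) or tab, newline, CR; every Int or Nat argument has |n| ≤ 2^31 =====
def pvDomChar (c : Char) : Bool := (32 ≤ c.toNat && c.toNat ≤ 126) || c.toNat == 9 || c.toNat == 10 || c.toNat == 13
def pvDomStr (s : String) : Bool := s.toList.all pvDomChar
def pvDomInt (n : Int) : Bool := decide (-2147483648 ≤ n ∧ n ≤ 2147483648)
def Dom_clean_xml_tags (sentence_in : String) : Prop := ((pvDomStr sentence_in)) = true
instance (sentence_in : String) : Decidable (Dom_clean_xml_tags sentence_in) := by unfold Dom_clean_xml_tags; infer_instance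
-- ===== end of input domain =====

-- B replaces A's one-pass do_record state machine by a two-phase pass (tag-span skipping, then a character filter); alternative structure, same cost.

-- ===== PORT A =====
-- state = (sentence_out, do_record); one fold step per letter, flag updated first, then the record test (as in A)
def pvStepA (st : List Char × Bool) (c : Char) : List Char × Bool :=
  let do_record := if c = '<' then false else if c = '>' then true else st.2
  if do_record && !(c == '>') && !(c == '\n') && !(c == '\'') then (st.1 ++ [c], do_record) else (st.1, do_record)

def clean_xml_tags (sentence_in : String) : String :=
  String.ofList (sentence_in.toList.foldl pvStepA ([], true)).1

-- ===== PORT B =====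
-- Phase 1 of Source B: the while loop that copies characters and, on '<', jumps past the next '>'
-- (find '>'); ported as mutual structural recursion: pvStrip = copying mode, pvDrop = the jump to '>'.
mutual
def pvStrip : List Char → List Char
  | [] => []
  | c :: rest => if c = '<' then pvDrop rest else c :: pvStrip rest
def pvDrop : List Char → List Char
  | [] => []
  | c :: rest => if c = '>' then pvStrip rest else pvDrop rest
end

-- Phase 2 of Source B: the filter "c not in \">\n'\"" over the kept characters
def clean_xml_tags_alt (sentence_in : String) : String :=
  String.ofList ((pvStrip sentence_in.toList).filter (fun c => !(c == '>' || c == '\n' || c == '\'')))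

-- ===== PRECONDITION & SPEC =====
def Spec_clean_xml_tags (sentence_in : String) (out : String) : Prop := out = clean_xml_tags_alt sentence_in
instance (sentence_in : String) (out : String) : Decidable (Spec_clean_xml_tags sentence_in out) := by unfold Spec_clean_xml_tags; infer_instance

-- ===== CLAIM (what is proved, stated in full; the proofs are below) =====
def Claim_equal_clean_xml_tags : Prop := ∀ (sentence_in : String), Dom_clean_xml_tags sentence_in → Spec_clean_xml_tags sentence_in (clean_xml_tags sentence_in)

-- ===== LEMMAS AND PROOFS =====

-- Invariant of A's fold: in recording mode it produces the filtered strip, in skipping mode the filtered drop.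
lemma pvFoldA (l : List Char) : ∀ (acc : List Char) (r : Bool),
    (List.foldl pvStepA (acc, r) l).1
      = acc ++ ((if r then pvStrip l else pvDrop l).filter (fun c => !(c == '>' || c == '\n' || c == '\''))) := by
  induction l with
  | nil => intro acc r; cases r <;> simp [pvStrip, pvDrop]
  | cons c rest ih =>
    intro acc r
    by_cases hlt : c = '<'
    · subst hlt
      cases r <;> simp [pvStepA, pvStrip, pvDrop, List.foldl_cons, ih]
    · by_cases hgt : c = '>'
      · subst hgt
        cases r <;> simp [pvStepA, pvStrip, pvDrop, List.foldl_cons, ih]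
      · cases r with
        | false =>
          simp [pvStepA, pvDrop, List.foldl_cons, ih, hgt]
        | true =>
          by_cases hnl : c = '\n'
          · subst hnl; simp [pvStepA, pvStrip, List.foldl_cons, ih]
          · by_cases hq : c = '\''
            · subst hq; simp [pvStepA, pvStrip, List.foldl_cons, ih]
            · simp [pvStepA, pvStrip, List.foldl_cons, ih, hlt, hgt, hnl, hq]

-- ===== VERDICT (by name: the statement is the Claim_ definition above) =====
theorem clean_xml_tags_spec : Claim_equal_clean_xml_tags := by
  intro s _
  unfold Spec_clean_xml_tags clean_xml_tags clean_xml_tags_alt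
  rw [pvFoldA]
  simp
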